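-- pv_equiv track=rewrite | github.com/aguaviva/msx1_smooth_scroller | precompiled/tile_generator.py | get_quarter_index
-- ===== SOURCE A (Python) =====
-- def get_quarter(data, index):
--     x = index % 2
--     y = index // 2
--     out = []
--     for i in data[y*8:(y+1)*8]:
--         out.append(i[x*8:(x+1)*8])
--     return out
--
-- def get_quarter_index(data, definitions):
--     d = list(definitions.keys())
--
--     for key in definitions.keys():
--         ii = d.index(key)*4
--         for i in range(4):
--             if data==get_quarter(definitions[key],i):
--                 return ii+i
--     return -1
-- ===== SOURCE B (Python) =====
-- def get_quarter_index(data, definitions):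
--     table = {}
--     idx = 0
--     for rows in definitions.values():
--         for i in range(4):
--             x = i % 2
--             y = i // 2
--             quarter = tuple(r[x*8:(x+1)*8] for r in rows[y*8:(y+1)*8])
--             table.setdefault(quarter, idx)
--             idx += 1
--     return table.get(tuple(data), -1)
-- ===== Notes on version B (the rewrite author's own statement) =====
-- stated objective: faster
-- what changed: B precomputes one hash table mapping each quarter (as a tuple of rows) to the first index that produces it, then answers with a single dict lookup, instead of A's scan that re-runs list(keys).index(key) for every key and compares data against each quarter list by list.
import Mathlib
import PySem

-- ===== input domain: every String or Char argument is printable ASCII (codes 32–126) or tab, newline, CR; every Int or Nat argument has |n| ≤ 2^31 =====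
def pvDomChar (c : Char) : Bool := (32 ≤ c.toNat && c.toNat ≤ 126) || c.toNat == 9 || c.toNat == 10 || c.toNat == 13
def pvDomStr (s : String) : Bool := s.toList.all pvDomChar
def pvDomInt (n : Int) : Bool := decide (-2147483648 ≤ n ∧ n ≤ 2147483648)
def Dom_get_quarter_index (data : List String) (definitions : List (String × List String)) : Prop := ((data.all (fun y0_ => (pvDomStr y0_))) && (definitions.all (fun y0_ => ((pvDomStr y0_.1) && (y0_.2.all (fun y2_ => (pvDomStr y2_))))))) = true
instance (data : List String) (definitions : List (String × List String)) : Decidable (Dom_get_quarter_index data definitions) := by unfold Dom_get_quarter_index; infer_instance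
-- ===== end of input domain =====

-- ===== PORT A =====
-- B builds the quarter->index table once and does one hash lookup; A rescans keys with list.index each iteration.
-- Port of A's get_quarter helper.
def get_quarter (data : List String) (index : Int) : List String :=
  let x := PySem.Int.mod index 2
  let y := PySem.Int.floordiv index 2
  (PySem.List.slice data (some (y*8)) (some ((y+1)*8))).foldl
    (fun out i => out ++ [PySem.Str.slice i (some (x*8)) (some ((x+1)*8))]) []

-- A's inner 'for i in range(4)' loop with early return.
def pvAInner (data : List String) (v : List String) (ii : Int) : List Int → Option Int
  | [] => none
  | i :: rest => if data = get_quarter v i then some (ii + i) else pvAInner data v ii rest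

-- A's outer 'for key in definitions.keys()' loop with early return.
-- d.index(key) never fails here (key comes from d), so getD 0 only totalizes it.
def pvAOuter (data : List String) (definitions : List (String × List String)) (d : List String) :
    List String → Option Int
  | [] => none
  | key :: rest =>
      let ii : Int := (((PySem.List.index? d key).getD 0 : Nat) : Int) * 4
      match pvAInner data (((PySem.Dict.mk definitions).get? key).getD []) ii (PySem.List.pyRange 0 4 1) with
      | some r => some r
      | none => pvAOuter data definitions d rest

def get_quarter_index (data : List String) (definitions : List (String × List String)) : Int :=
  let d := (PySem.Dict.mk definitions).keys
  (pvAOuter data definitions d d).getD (-1)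

-- ===== PORT B =====
-- B's inline quarter computation (tuple(r[x*8:(x+1)*8] for r in rows[y*8:(y+1)*8])).
def pvQuarterOf (rows : List String) (i : Int) : List String :=
  let x := PySem.Int.mod i 2
  let y := PySem.Int.floordiv i 2
  (PySem.List.slice rows (some (y*8)) (some ((y+1)*8))).map
    (fun r => PySem.Str.slice r (some (x*8)) (some ((x+1)*8)))

-- B's table-building loop over definitions.values(), threading (table, idx).
def pvBTable (values : List (List String)) :
    PySem.Dict (List String) Int → Int → PySem.Dict (List String) Int
  | t, idx =>
    match values with
    | [] => t
    | rows :: rest =>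
        let p := (PySem.List.pyRange 0 4 1).foldl
          (fun (p : PySem.Dict (List String) Int × Int) i =>
            (p.1.setdefault (pvQuarterOf rows i) p.2, p.2 + 1)) (t, idx)
        pvBTable rest p.1 p.2

def get_quarter_index_alt (data : List String) (definitions : List (String × List String)) : Int :=
  (pvBTable ((PySem.Dict.mk definitions).values) PySem.Dict.empty 0).getD data (-1)

-- ===== PRECONDITION & SPEC =====
-- Pre_ excludes association lists with duplicate keys: those do not represent any Python dict
-- (definitions is a dict in Python, whose keys are necessarily distinct).
def Pre_get_quarter_index (data : List String) (definitions : List (String × List String)) : Prop :=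
  (definitions.map Prod.fst).Nodup
instance (data : List String) (definitions : List (String × List String)) : Decidable (Pre_get_quarter_index data definitions) := by unfold Pre_get_quarter_index; infer_instance

def pvWitness_get_quarter_index : List String × (List (String × List String)) :=
  (["ab"], [("k", ["abcdefgh"]), ("m", [])])

def Spec_get_quarter_index (data : List String) (definitions : List (String × List String)) (out : Int) : Prop := out = get_quarter_index_alt data definitions
instance (data : List String) (definitions : List (String × List String)) (out : Int) : Decidable (Spec_get_quarter_index data definitions out) := by unfold Spec_get_quarter_index; infer_instance

-- ===== CLAIM (what is proved, stated in full; the proofs are below) =====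
def Claim_equal_get_quarter_index : Prop := ∀ (data : List String) (definitions : List (String × List String)), Dom_get_quarter_index data definitions → Pre_get_quarter_index data definitions → Spec_get_quarter_index data definitions (get_quarter_index data definitions)

-- ===== LEMMAS AND PROOFS =====

-- Common specification: first quarter (in value order, 4 quarters per value) equal to data, its running index.
def pvFMInner (data : List String) (rows : List String) (idx : Int) : List Int → Option Int
  | [] => none
  | i :: rest => if data = pvQuarterOf rows i then some (idx + i) else pvFMInner data rows idx rest

def pvFM (data : List String) : List (List String) → Int → Option Int
  | [], _ => none
  | rows :: rest, idx =>
      match pvFMInner data rows idx [0, 1, 2, 3] with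
      | some r => some r
      | none => pvFM data rest (idx + 4)

theorem pvQuarter_eq (v : List String) (i : Int) : get_quarter v i = pvQuarterOf v i := by
  simp only [get_quarter, pvQuarterOf, PySem.List.foldl_append_singleton_eq_map, List.nil_append]

theorem pvAInner_eq_fmInner (data v : List String) (ii : Int) (l : List Int) :
    pvAInner data v ii l = pvFMInner data v ii l := by
  induction l with
  | nil => rfl
  | cons i rest ih => simp [pvAInner, pvFMInner, pvQuarter_eq, ih]

theorem pvRange4 : PySem.List.pyRange 0 4 1 = [0, 1, 2, 3] := rfl

theorem pvDict_get?_middle {ν : Type} (l1 l2 : List (String × ν)) (k : String) (v : ν)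
    (h : k ∉ l1.map Prod.fst) :
    (PySem.Dict.mk (l1 ++ (k, v) :: l2)).get? k = some v := by
  induction l1 with
  | nil => simp [PySem.Dict.get?_mk_cons]
  | cons p rest ih =>
      rw [List.cons_append, PySem.Dict.get?_mk_cons]
      simp only [List.map_cons, List.mem_cons] at h
      push Not at h
      rw [if_neg (by simpa [beq_iff_eq] using fun hh => h.1 hh.symm)]
      exact ih h.2

theorem pvAOuter_eq_fm (data : List String) (definitions pre suf : List (String × List String))
    (hsplit : pre ++ suf = definitions) (hnd : (definitions.map Prod.fst).Nodup) :
    pvAOuter data definitions (definitions.map Prod.fst) (suf.map Prod.fst)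
      = pvFM data (suf.map Prod.snd) ((pre.length : Int) * 4) := by
  induction suf generalizing pre with
  | nil => rfl
  | cons kv rest ih =>
      obtain ⟨k, v⟩ := kv
      have hmap : definitions.map Prod.fst = pre.map Prod.fst ++ k :: rest.map Prod.fst := by
        rw [← hsplit]; simp
      have hknotin : k ∉ pre.map Prod.fst := by
        rw [hmap, List.nodup_append] at hnd
        intro hmem
        exact hnd.2.2 k hmem k (List.mem_cons_self) rfl
      have hidx : PySem.List.index? (definitions.map Prod.fst) k = some pre.length := by
        rw [PySem.List.index?_eq_some_iff]
        exact ⟨pre.map Prod.fst, rest.map Prod.fst, hmap, by simp, hknotin⟩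
      have hget : (PySem.Dict.mk definitions).get? k = some v := by
        rw [← hsplit]; exact pvDict_get?_middle pre rest k v hknotin
      show pvAOuter data definitions (definitions.map Prod.fst) (k :: rest.map Prod.fst) = _
      rw [pvAOuter, hidx, hget, pvRange4, pvAInner_eq_fmInner]
      simp only [Option.getD_some, List.map_cons, pvFM]
      rcases hin : pvFMInner data v ((pre.length : Int) * 4) [0, 1, 2, 3] with _ | r
      · have := ih (pre ++ [(k, v)]) (by simpa using hsplit)
        simp only [List.length_append, List.length_singleton] at this
        have harith : (((pre.length + 1 : Nat) : Int)) * 4 = ((pre.length : Int)) * 4 + 4 := by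
          push_cast; ring
        rw [harith] at this
        simp [this]
      · simp

theorem pvOr_sd (d : PySem.Dict (List String) Int) (q k : List String) (v : Int) (X : Option Int) :
    (((d.setdefault q v).get? k).or X) = (d.get? k).or ((if k = q then some v else none).or X) := by
  by_cases h : k = q
  · subst h
    rw [PySem.Dict.get?_setdefault_self]
    cases d.get? k <;> simp [Option.or]
  · rw [PySem.Dict.get?_setdefault_of_ne d v h]
    simp [h]

theorem pvBTable_get (data : List String) (values : List (List String))
    (t : PySem.Dict (List String) Int) (idx : Int) :
    (pvBTable values t idx).get? data = (t.get? data).or (pvFM data values idx) := by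
  induction values generalizing t idx with
  | nil => simp [pvBTable, pvFM]
  | cons rows rest ih =>
      rw [pvBTable, pvRange4]
      simp only [List.foldl_cons, List.foldl_nil]
      rw [ih]
      have h4 : idx + 1 + 1 + 1 + 1 = idx + 4 := by ring
      rw [h4, pvOr_sd, pvOr_sd, pvOr_sd, pvOr_sd]
      simp only [pvFM, pvFMInner]
      congr 1
      split_ifs <;> simp [Option.or] <;> ring

-- ===== VERDICT (by name: the statement is the Claim_ definition above) =====
theorem get_quarter_index_spec : Claim_equal_get_quarter_index := by
  intro data definitions _ hpre
  show (pvAOuter data definitions (definitions.map Prod.fst) (definitions.map Prod.fst)).getD (-1)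
      = ((pvBTable (definitions.map Prod.snd) PySem.Dict.empty 0).get? data).getD (-1)
  rw [pvAOuter_eq_fm data definitions [] definitions rfl hpre, pvBTable_get]
  norm_num
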